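-- pv_equiv track=rewrite | github.com/MUNComputerScienceSociety/ChallengeSet-W2020 | week-02/mwc441/MessyBanner.py | messyBanner
-- ===== SOURCE A (Python) =====
-- def messyBanner(bldg):
--     if(len(bldg.strip()) == 0):
--         return True
--     if(len(bldg) != 8):
--         spaces = 8 - len(bldg)
--         bldg = bldg + " "*spaces
--
--     letters = True
--     total = 0
--     for count in range(len(bldg)):
--         if(bldg[count].isupper() and letters):
--             total = total + 1
--         if(bldg[count].islower()):
--             return False
--         if(count < 3 and letters==False and bldg[count] != " "):
--             return False
--         if(count < 3 and letters == False and total < 1):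
--             return False
--         if(count < 3 and bldg[count].isalpha() == False and letters):
--             letters = False
--         if(count <= 6 and count >= 3 and bldg[count].isdigit() == False):
--             return False
--         if(count == 7 and (bldg[count] != " " and bldg[count].isupper() == False)):
--             return False
--     return True
-- ===== SOURCE B (Python) =====
-- def messyBanner(bldg):
--     # region-based validation: decision tree on the 3-char prefix, then
--     # digit block, separator char, and a lowercase-free overlength tail
--     if not bldg.strip():
--         return True
--     s = bldg + " " * (8 - len(bldg))
--     if not s[0].isupper():
--         return False
--     if s[1].isupper():
--         if s[2].islower():
--             return False
--     elif s[1].isalpha() or s[2] != " ":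
--         return False
--     return (all(c.isdigit() for c in s[3:7])
--             and (s[7] == " " or s[7].isupper())
--             and not any(c.islower() for c in s[8:]))
-- ===== Notes on version B (the rewrite author's own statement) =====
-- stated objective: simpler
-- what changed: Replaced A's single indexed loop with mutable flag/counter state and seven positional guards by a direct decision tree on the 3-char prefix plus independent region checks (digit block s[3:7], separator s[7], lowercase-free tail s[8:]).
import Mathlib
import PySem

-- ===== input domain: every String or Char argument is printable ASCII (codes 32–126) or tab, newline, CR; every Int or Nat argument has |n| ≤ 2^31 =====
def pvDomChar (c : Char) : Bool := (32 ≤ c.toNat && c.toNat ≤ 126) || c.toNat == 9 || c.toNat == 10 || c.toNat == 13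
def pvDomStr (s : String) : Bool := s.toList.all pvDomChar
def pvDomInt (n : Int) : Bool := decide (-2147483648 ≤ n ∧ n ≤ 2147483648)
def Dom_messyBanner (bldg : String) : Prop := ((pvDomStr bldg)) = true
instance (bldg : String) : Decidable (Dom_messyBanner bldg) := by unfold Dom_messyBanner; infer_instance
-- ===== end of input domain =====

-- B replaces A's single indexed loop with flag/counter state by a decision tree on the
-- 3-char prefix plus per-region checks (digit block, separator char, tail); objective: simpler.

-- ===== PORT A =====
-- the 'for count in range(len(bldg))' loop, step for step: state (letters, total), early returns
def messyBannerLoop : List Char → Nat → Bool → Int → Bool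
  | [], _, _, _ => true
  | c :: cs, count, letters, total =>
    let total := if PySem.Chars.isupper c && letters then total + 1 else total
    if PySem.Chars.islower c then false
    else if decide (count < 3) && (letters == false) && (c != ' ') then false
    else if decide (count < 3) && (letters == false) && decide (total < 1) then false
    else
      let letters := if decide (count < 3) && !(PySem.Chars.isalpha c) && letters then false
                     else letters
      if decide (count ≤ 6) && decide (3 ≤ count) && !(PySem.Chars.isdigit c) then false
      else if (count == 7) && ((c != ' ') && !(PySem.Chars.isupper c)) then false
      else messyBannerLoop cs (count + 1) letters total

def messyBanner (bldg : String) : Bool :=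
  let l := bldg.toList
  if (PySem.Chars.strip l).length == 0 then true
  else
    -- if len(bldg) != 8: bldg = bldg + " "*(8 - len(bldg))   (" "*n is empty for n ≤ 0)
    let l2 := if l.length != 8 then l ++ List.replicate ((8 - (l.length : Int)).toNat) ' ' else l
    messyBannerLoop l2 0 true 0

-- ===== PORT B =====
-- the final 'return (all(...) and ... and not any(...))' expression of Source B
def messyBannerTail (s : List Char) : Bool :=
  (PySem.List.slice s (some 3) (some 7)).all PySem.Chars.isdigit
  && ((s.getD 7 ' ' == ' ') || PySem.Chars.isupper (s.getD 7 ' '))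
  && !((PySem.List.slice s (some 8) none).any PySem.Chars.islower)

def messyBanner_alt (bldg : String) : Bool :=
  let l := bldg.toList
  if PySem.Chars.strip l == [] then true
  else
    let s := l ++ List.replicate ((8 - (l.length : Int)).toNat) ' '  -- bldg + " "*(8-len(bldg))
    if !(PySem.Chars.isupper (s.getD 0 ' ')) then false              -- s[0] (in range: |s| ≥ 8)
    else if PySem.Chars.isupper (s.getD 1 ' ') then
      if PySem.Chars.islower (s.getD 2 ' ') then false
      else messyBannerTail s
    else if PySem.Chars.isalpha (s.getD 1 ' ') || (s.getD 2 ' ' != ' ') then false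
    else messyBannerTail s

-- ===== PRECONDITION & SPEC =====
def Spec_messyBanner (bldg : String) (out : Bool) : Prop := out = messyBanner_alt bldg
instance (bldg : String) (out : Bool) : Decidable (Spec_messyBanner bldg out) := by unfold Spec_messyBanner; infer_instance

-- ===== CLAIM (what is proved, stated in full; the proofs are below) =====
def Claim_equal_messyBanner : Prop := ∀ (bldg : String), Dom_messyBanner bldg → Spec_messyBanner bldg (messyBanner bldg)

-- ===== LEMMAS AND PROOFS =====

theorem char_beq_decide (c d : Char) : (c == d) = decide (c = d) := by
  cases hb : c == d <;> cases hd : decide (c = d) <;> simp_all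

theorem upper_not_lower {c : Char} (h : PySem.Chars.isupper c = true) :
    PySem.Chars.islower c = false := by
  simp [PySem.Chars.isupper, PySem.Chars.islower, Char.le_def,
    UInt32.le_iff_toNat_le] at *
  omega

theorem digit_not_lower {c : Char} (h : PySem.Chars.isdigit c = true) :
    PySem.Chars.islower c = false := by
  simp [PySem.Chars.isdigit, PySem.Chars.islower, Char.le_def,
    UInt32.le_iff_toNat_le] at *
  omega

theorem not_alpha_of_not_upper_not_lower {c : Char}
    (hu : PySem.Chars.isupper c = false) (hl : PySem.Chars.islower c = false) :
    PySem.Chars.isalpha c = false := by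
  simp [PySem.Chars.isalpha, hu, hl]

-- for count ≥ 3 the loop's result does not depend on (letters, total)
theorem loop_state_indep : ∀ (t : List Char) (n : Nat) (L : Bool) (T : Int),
    3 ≤ n → messyBannerLoop t n L T = messyBannerLoop t n true 0
  | [], _, _, _, _ => rfl
  | c :: cs, n, L, T, h => by
    have h3 : ¬ (n < 3) := by omega
    have IH : ∀ (L : Bool) (T : Int),
        messyBannerLoop cs (n + 1) L T = messyBannerLoop cs (n + 1) true 0 :=
      fun L T => loop_state_indep cs (n + 1) L T (by omega)
    simp only [messyBannerLoop, h3, decide_false, Bool.false_and, Bool.if_false_left]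
    simp [IH]

-- for count ≥ 8 only the lowercase check remains
theorem loop_tail : ∀ (t : List Char) (n : Nat) (L : Bool) (T : Int),
    8 ≤ n → messyBannerLoop t n L T = !(t.any PySem.Chars.islower)
  | [], _, _, _, _ => rfl
  | c :: cs, n, L, T, h => by
    have h3 : ¬ (n < 3) := by omega
    have h6 : ¬ (n ≤ 6) := by omega
    have h7 : (n == 7) = false := by simp; omega
    simp only [messyBannerLoop, h3, h6, h7, decide_false, Bool.false_and,
      Bool.if_false_left, List.any_cons]
    cases hl : PySem.Chars.islower c <;>
      simp [loop_tail cs (n + 1) _ _ (by omega)]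

-- the loop from count = 3 computes B's tail conjunction
theorem loop_from3 : ∀ (d e f g h : Char) (t : List Char) (L : Bool) (T : Int),
    messyBannerLoop (d :: e :: f :: g :: h :: t) 3 L T =
      ((PySem.Chars.isdigit d && PySem.Chars.isdigit e && PySem.Chars.isdigit f
          && PySem.Chars.isdigit g)
        && ((h == ' ') || PySem.Chars.isupper h)
        && !(t.any PySem.Chars.islower)) := by
  intro d e f g h t L T
  simp only [messyBannerLoop, loop_tail t 8 _ _ (by omega)]
  cases hd : PySem.Chars.isdigit d
  · cases hld : PySem.Chars.islower d <;> simp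
  · have := digit_not_lower hd
    cases he : PySem.Chars.isdigit e
    · cases hle : PySem.Chars.islower e <;> simp [*]
    · have := digit_not_lower he
      cases hf : PySem.Chars.isdigit f
      · cases hlf : PySem.Chars.islower f <;> simp [*]
      · have := digit_not_lower hf
        cases hg : PySem.Chars.isdigit g
        · cases hlg : PySem.Chars.islower g <;> simp [*]
        · have := digit_not_lower hg
          cases hlh : PySem.Chars.islower h
          · simp [char_beq_decide, *]
          · have h1 : (h == ' ') = false := by
              simp only [char_beq_decide, decide_eq_false_iff_not]
              intro hc; subst hc; simp [PySem.Chars.islower] at hlh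
            have h2 : PySem.Chars.isupper h = false := by
              cases hu : PySem.Chars.isupper h
              · rfl
              · rw [upper_not_lower hu] at hlh; exact absurd hlh (by simp)
            simp [*]

-- single steps of the loop at the prefix indices, with the tail kept opaque
theorem step0_upper (a : Char) (rest : List Char) (ha : PySem.Chars.isupper a = true) :
    messyBannerLoop (a :: rest) 0 true 0 = messyBannerLoop rest 1 true 1 := by
  simp [messyBannerLoop, ha, upper_not_lower ha, PySem.Chars.isalpha]

theorem step0_low (a : Char) (rest : List Char) (hla : PySem.Chars.islower a = true) :
    messyBannerLoop (a :: rest) 0 true 0 = false := by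
  simp [messyBannerLoop, hla]

theorem step0_nonalpha (a : Char) (rest : List Char) (ha : PySem.Chars.isupper a = false)
    (hla : PySem.Chars.islower a = false) :
    messyBannerLoop (a :: rest) 0 true 0 = messyBannerLoop rest 1 false 0 := by
  simp [messyBannerLoop, ha, hla, not_alpha_of_not_upper_not_lower ha hla]

theorem step1_upper (b : Char) (rest : List Char) (hb : PySem.Chars.isupper b = true) :
    messyBannerLoop (b :: rest) 1 true 1 = messyBannerLoop rest 2 true 2 := by
  simp [messyBannerLoop, hb, upper_not_lower hb, PySem.Chars.isalpha]

theorem step1_low (b : Char) (rest : List Char) (hlb : PySem.Chars.islower b = true) :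
    messyBannerLoop (b :: rest) 1 true 1 = false := by
  simp [messyBannerLoop, hlb]

theorem step1_nonalpha (b : Char) (rest : List Char) (hb : PySem.Chars.isupper b = false)
    (hlb : PySem.Chars.islower b = false) :
    messyBannerLoop (b :: rest) 1 true 1 = messyBannerLoop rest 2 false 1 := by
  simp [messyBannerLoop, hb, hlb, not_alpha_of_not_upper_not_lower hb hlb]

theorem step2_low (c : Char) (rest : List Char) (hlc : PySem.Chars.islower c = true) :
    messyBannerLoop (c :: rest) 2 true 2 = false := by
  simp [messyBannerLoop, hlc]

theorem step2_notlower (c : Char) (rest : List Char) (hlc : PySem.Chars.islower c = false) :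
    messyBannerLoop (c :: rest) 2 true 2 = messyBannerLoop rest 3 true 0 := by
  simp only [messyBannerLoop, hlc]
  norm_num
  rw [loop_state_indep rest 3 _ _ (by omega)]

-- once letters is false with total = 0 the next index < 3 always rejects
theorem loop1_false (b : Char) (rest : List Char) :
    messyBannerLoop (b :: rest) 1 false 0 = false := by
  norm_num [messyBannerLoop]

-- letters false, total = 1, at index 2: continue iff the char is a space
theorem loop2 (c : Char) (rest : List Char) :
    messyBannerLoop (c :: rest) 2 false 1 =
      (if c == ' ' then messyBannerLoop rest 3 true 0 else false) := by
  cases hcs : c == ' '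
  · have hc : ¬ (c = ' ') := by simpa [char_beq_decide] using hcs
    norm_num [messyBannerLoop, hc]
  · have hc : c = ' ' := by simpa [char_beq_decide] using hcs
    subst hc
    norm_num [messyBannerLoop, show PySem.Chars.islower ' ' = false by decide,
      show PySem.Chars.isalpha ' ' = false by decide]
    exact loop_state_indep rest 3 _ _ (by omega)

-- the whole loop from count = 0 equals B's decision tree, for any string of length ≥ 8
theorem loop_eq_tree : ∀ (s : List Char), 8 ≤ s.length →
    messyBannerLoop s 0 true 0 =
      (if !(PySem.Chars.isupper (s.getD 0 ' ')) then false
       else if PySem.Chars.isupper (s.getD 1 ' ') then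
         if PySem.Chars.islower (s.getD 2 ' ') then false
         else messyBannerTail s
       else if PySem.Chars.isalpha (s.getD 1 ' ') || (s.getD 2 ' ' != ' ') then false
       else messyBannerTail s) := by
  intro s hs
  match s, hs with
  | a :: b :: c :: d :: e :: f :: g :: h :: t, _ =>
    have htail : messyBannerTail (a :: b :: c :: d :: e :: f :: g :: h :: t) =
        ((PySem.Chars.isdigit d && PySem.Chars.isdigit e && PySem.Chars.isdigit f
            && PySem.Chars.isdigit g)
          && ((h == ' ') || PySem.Chars.isupper h)
          && !(t.any PySem.Chars.islower)) := by
      simp [messyBannerTail, PySem.List.slice, List.getD, Bool.and_assoc]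
    simp only [List.getD_cons_zero, List.getD_cons_succ, htail]
    cases ha : PySem.Chars.isupper a
    · -- first char not uppercase: both sides are false
      cases hla : PySem.Chars.islower a
      · rw [step0_nonalpha a _ ha hla, loop1_false]
        simp
      · rw [step0_low a _ hla]; simp
    · rw [step0_upper a _ ha]
      cases hb : PySem.Chars.isupper b
      · cases hlb : PySem.Chars.islower b
        · -- b non-alphabetic: the prefix continues iff c is a space
          rw [step1_nonalpha b _ hb hlb, loop2, loop_from3]
          simp only [not_alpha_of_not_upper_not_lower hb hlb]
          by_cases hcp : c = ' ' <;> simp [hcp]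
        · rw [step1_low b _ hlb]
          simp [PySem.Chars.isalpha, hlb]
      · rw [step1_upper b _ hb]
        cases hlc : PySem.Chars.islower c
        · rw [step2_notlower c _ hlc, loop_from3]
          simp
        · rw [step2_low c _ hlc]
          simp

-- the padded string has length ≥ 8
theorem padded_length (l : List Char) :
    8 ≤ (l ++ List.replicate ((8 - (l.length : Int)).toNat) ' ').length := by
  simp [List.length_append]
  omega

-- ===== VERDICT (by name: the statement is the Claim_ definition above) =====
theorem messyBanner_spec : Claim_equal_messyBanner := by
  intro bldg _
  unfold Spec_messyBanner messyBanner messyBanner_alt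
  set l := bldg.toList with hl
  by_cases hstrip : PySem.Chars.strip l = []
  · simp [hstrip]
  · have hne : ((PySem.Chars.strip l).length == 0) = false := by
      simp [List.length_eq_zero_iff, hstrip]
    have hne2 : (PySem.Chars.strip l == []) = false := by simp [hstrip]
    simp only [hne, hne2, Bool.false_eq_true, if_false]
    have hpad : (if l.length != 8 then l ++ List.replicate ((8 - (l.length : Int)).toNat) ' '
        else l) = l ++ List.replicate ((8 - (l.length : Int)).toNat) ' ' := by
      by_cases h8 : l.length = 8
      · simp [h8]
      · simp [h8]
    rw [hpad, loop_eq_tree _ (padded_length l)]
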